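-- pv_equiv track=rewrite | github.com/DCXII/CryptSwissKnife | csk/engine.py | autokey_cipher
-- ===== SOURCE A (Python) =====
-- def autokey_cipher(text: str, key: str, decrypt: bool = False) -> str:
--     """Vigenere Autokey cipher"""
--     result = []
--     key = key.upper()
--
--     if decrypt:
--         decrypted_text_so_far = ""
--         for i, char in enumerate(text):
--             if char.isalpha():
--                 key_char = key[i % len(key)] if i < len(key) else decrypted_text_so_far[i - len(key)]
--
--                 base = ord('A') if char.isupper() else ord('a')
--                 shift = ord(key_char) - ord('A')
--
--                 shifted = (ord(char) - base - shift) % 26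
--                 decrypted_char = chr(base + shifted)
--                 decrypted_text_so_far += decrypted_char.upper() if char.isupper() else decrypted_char.lower()
--                 result.append(decrypted_char)
--             else:
--                 result.append(char)
--                 decrypted_text_so_far += char
--         return ''.join(result)
--     else:
--         full_key = key
--         text_upper = "".join(filter(str.isalpha, text)).upper()
--         full_key += text_upper[:len(text_upper) - len(key)]
--
--         key_index = 0
--         for char in text:
--             if char.isalpha():
--                 base = ord('A') if char.isupper() else ord('a')
--                 shift = ord(full_key[key_index % len(full_key)]) - ord('A')
--                 shifted = (ord(char) - base + shift) % 26
--                 result.append(chr(base + shifted))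
--                 key_index += 1
--             else:
--                 result.append(char)
--         return ''.join(result)
-- ===== SOURCE B (Python) =====
-- from collections import deque
--
--
-- def autokey_cipher(text: str, key: str, decrypt: bool = False) -> str:
--     """Vigenere Autokey cipher via a rolling keystream queue (no full_key precomputation)."""
--     out = []
--     queue = deque(key.upper())
--
--     if decrypt:
--         for char in text:
--             if char.isalpha():
--                 key_char = queue.popleft()
--                 base = ord('A') if char.isupper() else ord('a')
--                 shifted = (ord(char) - base - (ord(key_char) - ord('A'))) % 26
--                 plain = chr(base + shifted)
--                 out.append(plain)
--                 queue.append(plain.upper() if char.isupper() else plain.lower())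
--             else:
--                 out.append(char)
--                 queue.append(char)
--                 queue.popleft()
--     else:
--         for char in text:
--             if char.isalpha():
--                 queue.append(char.upper())
--                 key_char = queue.popleft()
--                 base = ord('A') if char.isupper() else ord('a')
--                 shifted = (ord(char) - base + (ord(key_char) - ord('A'))) % 26
--                 out.append(chr(base + shifted))
--             else:
--                 out.append(char)
--     return ''.join(out)
-- ===== Notes on version B (the rewrite author's own statement) =====
-- stated objective: alternative
-- what changed: Replaces A's precomputed full_key string (filter+upper+slice) and the accumulated decrypted_text_so_far string indexed by offset arithmetic with a single rolling deque keystream: pop the current key character from the front, push the autokey continuation character on the back, removing the full_key build, the slice, and the i<len(key) conditional.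
import Mathlib
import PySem

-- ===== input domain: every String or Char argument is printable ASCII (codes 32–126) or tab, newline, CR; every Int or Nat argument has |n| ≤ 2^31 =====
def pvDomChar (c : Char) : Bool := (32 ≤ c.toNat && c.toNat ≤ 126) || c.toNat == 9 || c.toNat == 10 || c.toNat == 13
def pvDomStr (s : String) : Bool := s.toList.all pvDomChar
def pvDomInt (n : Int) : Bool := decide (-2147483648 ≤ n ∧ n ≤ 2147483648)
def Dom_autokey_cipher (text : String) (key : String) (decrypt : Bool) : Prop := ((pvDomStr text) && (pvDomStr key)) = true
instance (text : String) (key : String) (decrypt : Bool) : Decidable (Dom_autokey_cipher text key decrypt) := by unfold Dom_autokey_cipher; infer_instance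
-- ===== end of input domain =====

-- B replaces A's precomputed full_key / accumulated decrypted_text_so_far string with one rolling deque keystream (alternative data structure, same cost).


-- shared per-character arithmetic (the identical three lines of Python in A and B):
-- chr(base + (ord(char) - base ∓ (ord(key_char) - ord('A'))) % 26)
def akDecChar (c kc : Char) : Char :=
  let base : Int := if PySem.Chars.isupper c then 65 else 97
  Char.ofNat (base + PySem.Int.mod ((c.toNat : Int) - base - ((kc.toNat : Int) - 65)) 26).toNat

def akEncChar (c kc : Char) : Char :=
  let base : Int := if PySem.Chars.isupper c then 65 else 97
  Char.ofNat (base + PySem.Int.mod ((c.toNat : Int) - base + ((kc.toNat : Int) - 65)) 26).toNat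

-- decrypted_char.upper() if char.isupper() else decrypted_char.lower()
def akCase (c d : Char) : Char :=
  if PySem.Chars.isupper c then PySem.Chars.upperChar d else PySem.Chars.lowerChar d

-- ===== PORT A =====
-- decrypt loop of A: i is the absolute position, dtsf is decrypted_text_so_far; none = IndexError
def akDecLoopA (keyU : List Char) (chars : List Char) (i : Nat) (res dtsf : List Char) : Option (List Char) :=
  match chars with
  | [] => some res
  | c :: rest =>
    if PySem.Chars.isalpha c then
      match (if i < keyU.length then PySem.List.pyGet? keyU (PySem.Int.mod (i : Int) (keyU.length : Int))
             else PySem.List.pyGet? dtsf ((i : Int) - (keyU.length : Int))) with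
      | none => none
      | some kc =>
        akDecLoopA keyU rest (i+1) (res ++ [akDecChar c kc]) (dtsf ++ [akCase c (akDecChar c kc)])
    else
      akDecLoopA keyU rest (i+1) (res ++ [c]) (dtsf ++ [c])

-- encrypt loop of A: k is key_index; none = ZeroDivisionError on 'k % 0' (unreachable when A returns)
def akEncLoopA (fullKey : List Char) (chars : List Char) (k : Nat) (res : List Char) : Option (List Char) :=
  match chars with
  | [] => some res
  | c :: rest =>
    if PySem.Chars.isalpha c then
      if fullKey.length = 0 then none
      else
        match PySem.List.pyGet? fullKey (PySem.Int.mod (k : Int) (fullKey.length : Int)) with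
        | none => none
        | some kc => akEncLoopA fullKey rest (k+1) (res ++ [akEncChar c kc])
    else
      akEncLoopA fullKey rest k (res ++ [c])

def autokey_cipher (text : String) (key : String) (decrypt : Bool) : String :=
  let keyU := key.toList.map PySem.Chars.upperChar
  if decrypt then
    match akDecLoopA keyU text.toList 0 [] [] with
    | some r => String.ofList r
    | none => ""   -- IndexError; excluded by Pre_
  else
    let textUpper := (text.toList.filter PySem.Chars.isalpha).map PySem.Chars.upperChar
    let fullKey := keyU ++ PySem.List.slice textUpper none (some ((textUpper.length : Int) - (keyU.length : Int)))
    match akEncLoopA fullKey text.toList 0 [] with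
    | some r => String.ofList r
    | none => ""   -- unreachable: Python A never raises on encrypt

-- ===== PORT B =====
-- B's decrypt loop: q is the deque (head = front); none = IndexError from deque.popleft() on an empty deque
def akDecLoopB (chars q res : List Char) : Option (List Char) :=
  match chars with
  | [] => some res
  | c :: rest =>
    if PySem.Chars.isalpha c then
      match q with
      | [] => none
      | kc :: q' => akDecLoopB rest (q' ++ [akCase c (akDecChar c kc)]) (res ++ [akDecChar c kc])
    else
      akDecLoopB rest ((q ++ [c]).drop 1) (res ++ [c])   -- append(char); popleft() (result discarded)

-- B's encrypt loop: append(char.upper()) then popleft(); the [] arm of the match is unreachable (the deque was just appended to)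
def akEncLoopB (chars q res : List Char) : Option (List Char) :=
  match chars with
  | [] => some res
  | c :: rest =>
    if PySem.Chars.isalpha c then
      match q ++ [PySem.Chars.upperChar c] with
      | [] => none
      | kc :: q' => akEncLoopB rest q' (res ++ [akEncChar c kc])
    else
      akEncLoopB rest q (res ++ [c])

def autokey_cipher_alt (text : String) (key : String) (decrypt : Bool) : String :=
  let keyU := key.toList.map PySem.Chars.upperChar
  if decrypt then
    match akDecLoopB text.toList keyU [] with
    | some r => String.ofList r
    | none => ""
  else
    match akEncLoopB text.toList keyU [] with
    | some r => String.ofList r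
    | none => ""

-- ===== PRECONDITION & SPEC =====
-- Pre_ excludes exactly the inputs where A raises (IndexError): decrypting with an empty key a text
-- containing at least one alphabetic character; B raises IndexError there too.
def Pre_autokey_cipher (text : String) (key : String) (decrypt : Bool) : Prop :=
  ¬ (decrypt = true ∧ key = "" ∧ text.toList.any PySem.Chars.isalpha = true)
instance (text : String) (key : String) (decrypt : Bool) : Decidable (Pre_autokey_cipher text key decrypt) := by unfold Pre_autokey_cipher; infer_instance

def pvWitness_autokey_cipher : String × String × Bool := ("Attack at Dawn!", "key", true)

def Spec_autokey_cipher (text : String) (key : String) (decrypt : Bool) (out : String) : Prop := out = autokey_cipher_alt text key decrypt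
instance (text : String) (key : String) (decrypt : Bool) (out : String) : Decidable (Spec_autokey_cipher text key decrypt out) := by unfold Spec_autokey_cipher; infer_instance

-- ===== CLAIM (what is proved, stated in full; the proofs are below) =====
def Claim_equal_autokey_cipher : Prop := ∀ (text : String) (key : String) (decrypt : Bool), Dom_autokey_cipher text key decrypt → Pre_autokey_cipher text key decrypt → Spec_autokey_cipher text key decrypt (autokey_cipher text key decrypt)

-- ===== LEMMAS AND PROOFS =====

-- decrypt: A's (position i, dtsf) state and B's deque are related by q = (keyU ++ dtsf).drop i with i = dtsf.length
lemma akDec_eq (keyU : List Char) (chars : List Char) :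
    ∀ (res dtsf : List Char), (keyU = [] → ∀ c ∈ chars, PySem.Chars.isalpha c = false) →
    akDecLoopA keyU chars dtsf.length res dtsf = akDecLoopB chars ((keyU ++ dtsf).drop dtsf.length) res := by
  induction chars with
  | nil => intro res dtsf _; simp [akDecLoopA, akDecLoopB]
  | cons c rest ih =>
    intro res dtsf h
    by_cases hc : PySem.Chars.isalpha c = true
    · have hk : keyU ≠ [] := by
        intro hk0
        have := h hk0 c (by simp)
        rw [hc] at this; cases this
      have hL : 0 < keyU.length := List.length_pos_iff.mpr hk
      have hlt : dtsf.length < (keyU ++ dtsf).length := by simp; omega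
      have hkc : (if dtsf.length < keyU.length then
            PySem.List.pyGet? keyU (PySem.Int.mod (dtsf.length : Int) (keyU.length : Int))
          else PySem.List.pyGet? dtsf ((dtsf.length : Int) - (keyU.length : Int)))
          = some ((keyU ++ dtsf)[dtsf.length]'hlt) := by
        by_cases hlen : dtsf.length < keyU.length
        · rw [if_pos hlen, PySem.Int.mod_natCast, Nat.mod_eq_of_lt hlen,
            PySem.List.pyGet?_natCast, ← List.getElem?_eq_getElem hlt,
            List.getElem?_append_left hlen]
        · rw [Nat.not_lt] at hlen
          have hcast : ((dtsf.length : Int) - (keyU.length : Int)) = ((dtsf.length - keyU.length : Nat) : Int) := by omega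
          rw [if_neg (by omega), hcast, PySem.List.pyGet?_natCast,
            ← List.getElem?_eq_getElem hlt, List.getElem?_append_right hlen]
      have hq : ∀ x : Char,
          (keyU ++ (dtsf ++ [x])).drop (dtsf.length + 1)
            = (keyU ++ dtsf).drop (dtsf.length + 1) ++ [x] := by
        intro x
        rw [← List.append_assoc, List.drop_append_of_le_length (by simp; omega)]
      simp only [akDecLoopA, akDecLoopB, hc, if_pos, hkc, List.drop_eq_getElem_cons hlt]
      rw [← hq]
      simpa using ih (res ++ [akDecChar c ((keyU ++ dtsf)[dtsf.length]'hlt)])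
        (dtsf ++ [akCase c (akDecChar c ((keyU ++ dtsf)[dtsf.length]'hlt))])
        (fun hk0 c' hc' => h hk0 c' (List.mem_cons_of_mem _ hc'))
    · have hq : ((keyU ++ dtsf).drop dtsf.length ++ [c]).drop 1
          = (keyU ++ (dtsf ++ [c])).drop (dtsf.length + 1) := by
        rw [← List.append_assoc, ← List.drop_append_of_le_length (by simp),
          List.drop_drop]
      simp only [akDecLoopA, akDecLoopB, hc, Bool.false_eq_true]
      rw [hq]
      simpa using ih (res ++ [c]) (dtsf ++ [c])
        (fun hk0 c' hc' => h hk0 c' (List.mem_cons_of_mem _ hc'))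

-- encrypt: A's full_key lookup at k < T.length is the k-th element of keyU ++ T (T = uppercased alphas of the text)
lemma akEnc_key (keyU T : List Char) (k : Nat) (hk : k < T.length) :
    (keyU ++ PySem.List.slice T none (some ((T.length : Int) - (keyU.length : Int)))).length ≠ 0 ∧
    PySem.List.pyGet?
      (keyU ++ PySem.List.slice T none (some ((T.length : Int) - (keyU.length : Int))))
      (PySem.Int.mod (k : Int)
        ((keyU ++ PySem.List.slice T none (some ((T.length : Int) - (keyU.length : Int)))).length : Int))
      = (keyU ++ T)[k]? := by
  by_cases hle : keyU.length ≤ T.length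
  · have hstop : ((T.length : Int) - (keyU.length : Int)) = ((T.length - keyU.length : Nat) : Int) := by omega
    rw [hstop, PySem.List.slice_to_natCast]
    have hlen : (keyU ++ T.take (T.length - keyU.length)).length = T.length := by
      simp; omega
    refine ⟨by omega, ?_⟩
    rw [hlen, PySem.Int.mod_natCast, Nat.mod_eq_of_lt hk, PySem.List.pyGet?_natCast]
    by_cases hkL : k < keyU.length
    · rw [List.getElem?_append_left hkL, List.getElem?_append_left hkL]
    · rw [Nat.not_lt] at hkL
      rw [List.getElem?_append_right hkL, List.getElem?_append_right hkL,
        List.getElem?_take_of_lt (by omega)]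
  · have hgt : T.length < keyU.length := by omega
    have hpos : 0 < keyU.length - T.length := by omega
    have hstop : ((T.length : Int) - (keyU.length : Int)) = -(((keyU.length - T.length : Nat)) : Int) := by omega
    rw [hstop, PySem.List.slice_to_neg_natCast T (keyU.length - T.length) hpos]
    have hkL : k < keyU.length := by omega
    have hklen : k < (keyU ++ T.take (T.length - (keyU.length - T.length))).length := by
      simp; omega
    refine ⟨by omega, ?_⟩
    rw [PySem.Int.mod_natCast, Nat.mod_eq_of_lt hklen, PySem.List.pyGet?_natCast,
      List.getElem?_append_left hkL, List.getElem?_append_left hkL]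

-- encrypt: A's key_index k and B's deque are related by q ++ upperAlpha(rest) = (keyU ++ T).drop k
lemma akEnc_eq (keyU T : List Char) (chars : List Char) :
    ∀ (q res : List Char) (k : Nat),
    q ++ (chars.filter PySem.Chars.isalpha).map PySem.Chars.upperChar = (keyU ++ T).drop k →
    k + (chars.filter PySem.Chars.isalpha).length = T.length →
    akEncLoopA (keyU ++ PySem.List.slice T none (some ((T.length : Int) - (keyU.length : Int)))) chars k res
      = akEncLoopB chars q res := by
  induction chars with
  | nil => intro q res k _ _; simp [akEncLoopA, akEncLoopB]
  | cons c rest ih =>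
    intro q res k hq hk
    by_cases hc : PySem.Chars.isalpha c = true
    · rw [List.filter_cons_of_pos hc] at hq hk
      have hkT : k < T.length := by simp at hk; omega
      obtain ⟨hne, hget⟩ := akEnc_key keyU T k hkT
      have hkS : k < (keyU ++ T).length := by simp; omega
      have hq' : (q ++ [PySem.Chars.upperChar c]) ++ (rest.filter PySem.Chars.isalpha).map PySem.Chars.upperChar
          = (keyU ++ T)[k]'hkS :: (keyU ++ T).drop (k + 1) := by
        rw [List.append_assoc, ← List.drop_eq_getElem_cons hkS]
        simpa using hq
      rcases hq1 : q ++ [PySem.Chars.upperChar c] with _ | ⟨kc, q2⟩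
      · exact absurd hq1 (by simp)
      · rw [hq1] at hq'
        simp only [List.cons_append] at hq'
        have hkc : kc = (keyU ++ T)[k]'hkS := (List.cons.injEq _ _ _ _ ▸ hq').1
        have htail : q2 ++ (rest.filter PySem.Chars.isalpha).map PySem.Chars.upperChar
            = (keyU ++ T).drop (k + 1) := (List.cons.injEq _ _ _ _ ▸ hq').2
        simp only [akEncLoopA, akEncLoopB, hc, if_pos, if_neg hne, hget, hq1,
          List.getElem?_eq_getElem hkS, hkc]
        exact ih q2 (res ++ [akEncChar c ((keyU ++ T)[k]'hkS)]) (k + 1) htail (by simp at hk ⊢; omega)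
    · rw [List.filter_cons_of_neg (by simp [hc])] at hq hk
      simp only [akEncLoopA, akEncLoopB, hc, Bool.false_eq_true]
      exact ih q (res ++ [c]) k hq hk

-- ===== VERDICT (by name: the statement is the Claim_ definition above) =====
theorem autokey_cipher_spec : Claim_equal_autokey_cipher := by
  intro text key decrypt _hd hpre
  unfold Spec_autokey_cipher autokey_cipher autokey_cipher_alt
  cases decrypt
  · simp only [Bool.false_eq_true, if_false]
    rw [akEnc_eq (key.toList.map PySem.Chars.upperChar)
      ((text.toList.filter PySem.Chars.isalpha).map PySem.Chars.upperChar)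
      text.toList (key.toList.map PySem.Chars.upperChar) [] 0 (by simp) (by simp)]
  · simp only [if_true]
    have h : (key.toList.map PySem.Chars.upperChar) = [] → ∀ c ∈ text.toList, PySem.Chars.isalpha c = false := by
      intro hk0 c hcmem
      by_contra hne
      have hkey : key = "" := String.toList_eq_nil_iff.mp (by simpa using hk0)
      exact hpre ⟨rfl, hkey, List.any_eq_true.mpr ⟨c, hcmem, by simpa using hne⟩⟩
    have h2 : akDecLoopA (key.toList.map PySem.Chars.upperChar) text.toList 0 [] []
        = akDecLoopB text.toList (key.toList.map PySem.Chars.upperChar) [] := by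
      simpa using akDec_eq (key.toList.map PySem.Chars.upperChar) text.toList [] [] h
    rw [h2]
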